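-- pv_equiv track=rewrite | github.com/khengleng/YeayMonny | chat/house_numerology.py | _string_value
-- ===== SOURCE A (Python) =====
-- LETTER_VALUES = {
--     "A": 1,
--     "B": 2,
--     "C": 3,
--     "D": 4,
--     "E": 5,
--     "F": 6,
--     "G": 7,
--     "H": 8,
--     "I": 9,
--     "J": 1,
--     "K": 2,
--     "L": 3,
--     "M": 4,
--     "N": 5,
--     "O": 6,
--     "P": 7,
--     "Q": 8,
--     "R": 9,
--     "S": 1,
--     "T": 2,
--     "U": 3,
--     "V": 4,
--     "W": 5,
--     "X": 6,
--     "Y": 7,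
--     "Z": 8,
-- }
--
-- def _string_value(token: str) -> int:
--     total = 0
--     for ch in token.upper():
--         if ch.isdigit():
--             total += int(ch)
--         elif ch.isalpha():
--             total += LETTER_VALUES.get(ch, 0)
--     return total
-- ===== SOURCE B (Python) =====
-- def _string_value(token: str) -> int:
--     # Staged: tally character frequencies first, then sum count * value over
--     # the DISTINCT characters, computing each value arithmetically from its code.
--     counts = {}
--     for ch in token.upper():
--         counts[ch] = counts.get(ch, 0) + 1
--     total = 0
--     for ch, n in counts.items():
--         o = ord(ch)
--         if 48 <= o <= 57:          # '0'..'9'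
--             v = o - 48
--         elif 65 <= o <= 90:        # 'A'..'Z'
--             v = (o - 65) % 9 + 1
--         else:
--             v = 0
--         total += n * v
--     return total
-- ===== Notes on version B (the rewrite author's own statement) =====
-- stated objective: alternative
-- what changed: Replaces A's single pass with the lookup table by a two-stage algorithm: first a frequency dict of the uppercased characters is built, then the total is the sum of count * value over the DISTINCT characters only, each value computed arithmetically from the character code ((ord-65)%9+1 for letters, ord-48 for digits) instead of the 26-entry dict.
import Mathlib
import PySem

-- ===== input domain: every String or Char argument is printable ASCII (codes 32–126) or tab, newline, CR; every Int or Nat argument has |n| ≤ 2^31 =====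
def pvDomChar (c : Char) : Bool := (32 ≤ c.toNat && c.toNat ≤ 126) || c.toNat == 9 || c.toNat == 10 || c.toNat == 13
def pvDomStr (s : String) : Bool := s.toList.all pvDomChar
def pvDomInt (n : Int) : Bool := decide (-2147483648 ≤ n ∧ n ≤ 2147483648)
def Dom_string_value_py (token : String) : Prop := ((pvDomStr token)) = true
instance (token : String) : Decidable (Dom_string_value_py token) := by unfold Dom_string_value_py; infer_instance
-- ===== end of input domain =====

-- B replaces A's single lookup-table pass by a two-stage algorithm: a frequency dict of the
-- uppercased characters, then count * arithmetic-value summed over the distinct characters.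

-- ===== PORT A =====
def letterValues : PySem.Dict Char Int := PySem.Dict.ofList
  [('A', 1), ('B', 2), ('C', 3), ('D', 4), ('E', 5), ('F', 6), ('G', 7), ('H', 8), ('I', 9),
   ('J', 1), ('K', 2), ('L', 3), ('M', 4), ('N', 5), ('O', 6), ('P', 7), ('Q', 8), ('R', 9),
   ('S', 1), ('T', 2), ('U', 3), ('V', 4), ('W', 5), ('X', 6), ('Y', 7), ('Z', 8)]

def string_value_py (token : String) : Int :=
  (PySem.Chars.upper token.toList).foldl (fun total ch =>
    if PySem.Chars.isdigit ch then
      -- int(ch): on the ASCII domain a digit char always parses, so getD 0 is never the default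
      total + (PySem.Int.ofStr? (String.mk [ch])).getD 0
    else if PySem.Chars.isalpha ch then
      total + letterValues.getD ch 0
    else total) 0

-- ===== PORT B =====
-- arithmetic value of a character code (B's if/elif/else over ord(ch))
def svVal (o : Int) : Int :=
  if 48 ≤ o ∧ o ≤ 57 then o - 48
  else if 65 ≤ o ∧ o ≤ 90 then PySem.Int.mod (o - 65) 9 + 1
  else 0

def string_value_py_alt (token : String) : Int :=
  let counts : PySem.Dict Char Int :=
    (PySem.Chars.upper token.toList).foldl
      (fun d ch => d.insert ch (d.getD ch 0 + 1)) PySem.Dict.empty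
  counts.items.foldl (fun total p => total + p.2 * svVal ((p.1.toNat : Int))) 0

-- ===== PRECONDITION & SPEC =====
def Spec_string_value_py (token : String) (out : Int) : Prop := out = string_value_py_alt token
instance (token : String) (out : Int) : Decidable (Spec_string_value_py token out) := by unfold Spec_string_value_py; infer_instance

-- ===== CLAIM (what is proved, stated in full; the proofs are below) =====
def Claim_equal_string_value_py : Prop := ∀ (token : String), Dom_string_value_py token → Spec_string_value_py token (string_value_py token)

-- ===== LEMMAS AND PROOFS =====

-- A's per-character contribution (applied to an already-uppercased char)
def aStep (ch : Char) : Int :=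
  if PySem.Chars.isdigit ch then (PySem.Int.ofStr? (String.mk [ch])).getD 0
  else if PySem.Chars.isalpha ch then letterValues.getD ch 0
  else 0

lemma foldl_aStep (cs : List Char) (t : Int) :
    cs.foldl (fun total ch =>
      if PySem.Chars.isdigit ch then
        total + (PySem.Int.ofStr? (String.mk [ch])).getD 0
      else if PySem.Chars.isalpha ch then
        total + letterValues.getD ch 0
      else total) t = t + (cs.map aStep).sum := by
  induction cs generalizing t with
  | nil => simp
  | cons c cs ih =>
    simp only [List.foldl_cons, ih, List.map_cons, List.sum_cons, aStep]
    split_ifs <;> ring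

-- on characters produced by upper on the domain, A's branch value equals B's arithmetic value
set_option maxRecDepth 4000 in
lemma aStep_eq_svVal_fin : ∀ n : Fin 128, pvDomChar (Char.ofNat n.val) = true →
    aStep (PySem.Chars.upperChar (Char.ofNat n.val)) =
      svVal (((PySem.Chars.upperChar (Char.ofNat n.val)).toNat : Int)) := by decide

lemma aStep_eq_svVal (c : Char) (h : pvDomChar c = true) :
    aStep (PySem.Chars.upperChar c) = svVal (((PySem.Chars.upperChar c).toNat : Int)) := by
  have hlt : c.toNat < 128 := by
    simp [pvDomChar] at h
    omega
  have hc : Char.ofNat c.toNat = c := Char.ofNat_toNat c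
  have := aStep_eq_svVal_fin ⟨c.toNat, hlt⟩ (by rwa [hc])
  rwa [hc] at this

-- summing (if k = x then v k else 0) over a Nodup list containing x gives v x
lemma sum_map_ite_mem (v : Char → Int) (x : Char) :
    ∀ (s : List Char), s.Nodup → x ∈ s →
      (s.map (fun k => if k = x then v k else 0)).sum = v x := by
  intro s
  induction s with
  | nil => intro _ hx; cases hx
  | cons a s ih =>
    intro hnd hx
    have hnd' := List.nodup_cons.mp hnd
    simp only [List.map_cons, List.sum_cons]
    by_cases hax : a = x
    · subst hax
      have hz : (s.map (fun k => if k = a then v k else 0)).sum = 0 := by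
        apply List.sum_eq_zero
        intro y hy
        simp only [List.mem_map] at hy
        obtain ⟨k, hk, rfl⟩ := hy
        have : k ≠ a := fun h => hnd'.1 (h ▸ hk)
        simp [this]
      simp [hz]
    · have hx' : x ∈ s := by
        rcases List.mem_cons.mp hx with h | h
        · exact absurd h.symm hax
        · exact h
      rw [if_neg hax, ih hnd'.2 hx']
      ring

-- sum of count * v over any Nodup superset of xs equals the plain sum of v over xs
lemma sum_count_mul (v : Char → Int) (s : List Char) (hnd : s.Nodup) :
    ∀ xs : List Char, (∀ x ∈ xs, x ∈ s) →
      (s.map (fun k => (xs.count k : Int) * v k)).sum = (xs.map v).sum := by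
  intro xs
  induction xs with
  | nil => intro _; simp
  | cons x xs ih =>
    intro hsub
    have hsplit : ∀ k, ((x :: xs).count k : Int) * v k
        = (xs.count k : Int) * v k + (if k = x then v k else 0) := by
      intro k
      by_cases hk : k = x
      · subst hk; simp [List.count_cons_self]; ring
      · have : (x :: xs).count k = xs.count k := by
          rw [List.count_cons]; simp [Ne.symm hk]
        simp [this, hk]
    calc (s.map (fun k => ((x :: xs).count k : Int) * v k)).sum
        = (s.map (fun k => (xs.count k : Int) * v k + (if k = x then v k else 0))).sum := by
          exact congrArg List.sum (List.map_congr_left (fun k _ => hsplit k))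
      _ = (s.map (fun k => (xs.count k : Int) * v k)).sum
          + (s.map (fun k => if k = x then v k else 0)).sum := by
          rw [← List.sum_map_add]
      _ = (xs.map v).sum + v x := by
          rw [ih (fun y hy => hsub y (List.mem_cons_of_mem x hy)),
              sum_map_ite_mem v x s hnd (hsub x (List.mem_cons_self))]
      _ = ((x :: xs).map v).sum := by simp [List.map_cons]; ring

-- ===== VERDICT (by name: the statement is the Claim_ definition above) =====
theorem string_value_py_spec : Claim_equal_string_value_py := by
  intro token hdom
  unfold Spec_string_value_py string_value_py string_value_py_alt
  rw [foldl_aStep]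
  simp only [zero_add]
  rw [PySem.Dict.foldl_insert_getD_add_one_eq_counter, PySem.Dict.items_counter,
      PySem.List.foldl_add]
  simp only [zero_add, List.map_map, Function.comp_def]
  rw [sum_count_mul (fun k => svVal ((k.toNat : Int)))
        (PySem.Set.ofList (PySem.Chars.upper token.toList))
        (PySem.Set.nodup_ofList _)
        (PySem.Chars.upper token.toList)
        (fun x hx => (PySem.Set.mem_ofList _ _).mpr hx)]
  apply congrArg List.sum
  apply List.map_congr_left
  intro u hu
  simp only [PySem.Chars.upper, List.mem_map] at hu
  obtain ⟨c, hc, rfl⟩ := hu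
  exact aStep_eq_svVal c (List.all_eq_true.mp hdom c hc)
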